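-- pv_equiv track=rewrite | github.com/dmarek03/INTRODUCTION_TO_COMPUTER_SCIENCE | KOLOKWIA/zad_2.py | change_to_bin
-- ===== SOURCE A (Python) =====
-- def change_to_bin(number: int, base: int):
--     new_number = 0
--     mult = 1
--     n_abs = abs(number)
--     while n_abs > 0:
--         new_number += mult * (n_abs % base)
--         n_abs //= base
--         mult *= 10
--     return new_number
-- ===== SOURCE B (Python) =====
-- def change_to_bin(number: int, base: int):
--     digits = []
--     n = abs(number)
--     while n > 0:
--         digits.append(n % base)
--         n //= base
--     result = 0
--     for d in reversed(digits):
--         result = result * 10 + d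
--     return result
-- ===== Notes on version B (the rewrite author's own statement) =====
-- stated objective: alternative
-- what changed: A accumulates a moving power-of-ten multiplier inside a single while loop; B first materializes the base-`base` digit list (least-significant first) and then folds over it in reverse with result = result*10 + digit, with no multiplier variable.
import Mathlib
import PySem

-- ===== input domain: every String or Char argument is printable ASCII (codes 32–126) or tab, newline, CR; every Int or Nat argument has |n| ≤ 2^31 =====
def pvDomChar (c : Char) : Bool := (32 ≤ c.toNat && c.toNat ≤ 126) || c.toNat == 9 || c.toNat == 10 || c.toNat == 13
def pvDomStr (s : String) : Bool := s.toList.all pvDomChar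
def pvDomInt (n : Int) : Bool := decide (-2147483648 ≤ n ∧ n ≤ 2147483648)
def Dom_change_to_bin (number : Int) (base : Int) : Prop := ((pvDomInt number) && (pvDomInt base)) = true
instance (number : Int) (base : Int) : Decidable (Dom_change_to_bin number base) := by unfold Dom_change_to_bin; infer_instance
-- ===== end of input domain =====

-- B replaces A's single loop with a moving power-of-ten multiplier by a two-phase
-- decomposition: build the base-`base` digit list, then fold it in reverse with
-- result = result*10 + digit (objective: alternative; same cost).

-- ===== PORT A =====
-- A's while loop, with fuel (|number|+1 iterations always suffice on Pre_).
def pvALoop (fuel : Nat) (nAbs : Int) (base : Int) (mult : Int) (newNumber : Int) : Int :=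
  match fuel with
  | 0 => newNumber
  | f + 1 =>
    if nAbs > 0 then
      pvALoop f (PySem.Int.floordiv nAbs base) base (mult * 10)
        (newNumber + mult * (PySem.Int.mod nAbs base))
    else newNumber

def change_to_bin (number : Int) (base : Int) : Int :=
  pvALoop (number.natAbs + 1) (Int.natAbs number) base 1 0

-- ===== PORT B =====
-- phase 1 of B: collect digits least-significant first (same loop condition, with fuel)
def pvDigits (fuel : Nat) (n : Int) (base : Int) : List Int :=
  match fuel with
  | 0 => []
  | f + 1 =>
    if n > 0 then
      PySem.Int.mod n base :: pvDigits f (PySem.Int.floordiv n base) base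
    else []

def change_to_bin_alt (number : Int) (base : Int) : Int :=
  let digits := pvDigits (number.natAbs + 1) (Int.natAbs number) base
  digits.reverse.foldl (fun r d => r * 10 + d) 0

-- ===== PRECONDITION & SPEC =====
-- Pre_ excludes base = 0 (Python A raises ZeroDivisionError once the loop runs) and
-- base = 1 with number ≠ 0 (Python A loops forever); on all other inputs A returns.
def Pre_change_to_bin (number : Int) (base : Int) : Prop :=
  number = 0 ∨ (base ≠ 0 ∧ base ≠ 1)
instance (number : Int) (base : Int) : Decidable (Pre_change_to_bin number base) := by
  unfold Pre_change_to_bin; infer_instance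

def pvWitness_change_to_bin : Int × Int := (13, 2)

def Spec_change_to_bin (number : Int) (base : Int) (out : Int) : Prop := out = change_to_bin_alt number base
instance (number : Int) (base : Int) (out : Int) : Decidable (Spec_change_to_bin number base out) := by unfold Spec_change_to_bin; infer_instance

-- ===== CLAIM (what is proved, stated in full; the proofs are below) =====
def Claim_equal_change_to_bin : Prop := ∀ (number : Int) (base : Int), Dom_change_to_bin number base → Pre_change_to_bin number base → Spec_change_to_bin number base (change_to_bin number base)

-- ===== LEMMAS AND PROOFS =====

theorem pvALoop_eq_foldr (fuel : Nat) (base : Int) :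
    ∀ (n mult acc : Int),
      pvALoop fuel n base mult acc
        = acc + mult * (pvDigits fuel n base).foldr (fun d r => r * 10 + d) 0 := by
  induction fuel with
  | zero => intro n mult acc; simp [pvALoop, pvDigits]
  | succ f ih =>
    intro n mult acc
    by_cases h : n > 0
    · simp only [pvALoop, pvDigits, if_pos h, List.foldr_cons, ih]
      ring
    · simp [pvALoop, pvDigits, if_neg h]

-- ===== VERDICT (by name: the statement is the Claim_ definition above) =====
theorem change_to_bin_spec : Claim_equal_change_to_bin := by
  intro number base _ _
  unfold Spec_change_to_bin change_to_bin change_to_bin_alt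
  rw [pvALoop_eq_foldr, List.foldl_reverse]
  ring
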